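-- pv_equiv track=rewrite | github.com/sssay10/ozon_ai_call_simulator | judge_service/judge.py | _filter_timecodes_by_patterns
-- ===== SOURCE A (Python) =====
-- from typing import Any, Dict, List, Tuple
--
-- def _filter_timecodes_by_patterns(
--     items: List[Dict[str, Any]],
--     patterns: List[str],
-- ) -> List[Dict[str, Any]]:
--     if not items:
--         return []
--     lowered_patterns = [p.lower() for p in patterns]
--     filtered = []
--     for item in items:
--         label = str(item.get("label") or "").lower()
--         comment = str(item.get("comment") or "").lower()
--         combined = f"{label} {comment}"
--         if any(p in combined for p in lowered_patterns):
--             continue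
--         filtered.append(item)
--     return filtered
-- ===== SOURCE B (Python) =====
-- from typing import Any, Dict, List, Tuple
--
-- def _filter_timecodes_by_patterns(
--     items: List[Dict[str, Any]],
--     patterns: List[str],
-- ) -> List[Dict[str, Any]]:
--     # Pattern-major filtering: lower each item's search text once, then let each
--     # pattern strike items out of the shrinking survivor list.
--     survivors = [
--         (str(it.get("label") or "").lower() + " " + str(it.get("comment") or "").lower(), it)
--         for it in items
--     ]
--     for p in patterns:
--         lp = p.lower()
--         survivors = [cv for cv in survivors if lp not in cv[0]]
--     return [it for _, it in survivors]
-- ===== Notes on version B (the rewrite author's own statement) =====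
-- stated objective: alternative
-- what changed: B builds each item's lowered 'label comment' search text once, then filters pattern-by-pattern over the shrinking survivor list (pattern-major passes) instead of A's item-major loop that tests every pattern against each item.
import Mathlib
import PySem

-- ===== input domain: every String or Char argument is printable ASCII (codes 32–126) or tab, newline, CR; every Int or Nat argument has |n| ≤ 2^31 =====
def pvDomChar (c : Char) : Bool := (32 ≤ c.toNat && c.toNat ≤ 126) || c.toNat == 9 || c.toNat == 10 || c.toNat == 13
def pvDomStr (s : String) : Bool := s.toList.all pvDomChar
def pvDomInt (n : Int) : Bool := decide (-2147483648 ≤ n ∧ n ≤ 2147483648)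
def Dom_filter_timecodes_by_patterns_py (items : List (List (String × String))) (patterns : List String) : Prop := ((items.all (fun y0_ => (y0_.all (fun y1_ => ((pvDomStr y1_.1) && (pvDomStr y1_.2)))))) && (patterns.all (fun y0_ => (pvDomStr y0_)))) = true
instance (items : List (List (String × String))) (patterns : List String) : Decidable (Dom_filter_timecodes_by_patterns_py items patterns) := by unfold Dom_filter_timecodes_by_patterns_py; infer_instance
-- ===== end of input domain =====

-- B replaces A's item-major scan (every pattern retried against every item) by pattern-major
-- passes over a shrinking survivor list whose lowered search text is built once per item
-- (objective: alternative traversal order, same exact output).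

-- ===== PORT A =====
-- label/comment lowered search text of one item: str(item.get(k) or "").lower(), f"{label} {comment}"
def pvCombined (item : List (String × String)) : List Char :=
  PySem.Chars.lower ((PySem.Dict.mk item).getD "label" "").toList
    ++ ' ' :: PySem.Chars.lower ((PySem.Dict.mk item).getD "comment" "").toList

def filter_timecodes_by_patterns_py (items : List (List (String × String))) (patterns : List String) : List (List (String × String)) :=
  if items = [] then []
  else
    let lowered_patterns := patterns.map (fun p => PySem.Chars.lower p.toList)
    items.foldl (fun filtered item =>
      let combined := pvCombined item
      if lowered_patterns.any (fun p => PySem.Chars.isIn p combined) then filtered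
      else filtered ++ [item]) []

-- ===== PORT B =====
def filter_timecodes_by_patterns_py_alt (items : List (List (String × String))) (patterns : List String) : List (List (String × String)) :=
  let survivors := items.map (fun it => (pvCombined it, it))
  (patterns.foldl (fun sv p =>
      let lp := PySem.Chars.lower p.toList
      sv.filter (fun cv => !PySem.Chars.isIn lp cv.1)) survivors).map (·.2)

-- ===== PRECONDITION & SPEC =====
def Spec_filter_timecodes_by_patterns_py (items : List (List (String × String))) (patterns : List String) (out : List (List (String × String))) : Prop := out = filter_timecodes_by_patterns_py_alt items patterns
instance (items : List (List (String × String))) (patterns : List String) (out : List (List (String × String))) : Decidable (Spec_filter_timecodes_by_patterns_py items patterns out) := by unfold Spec_filter_timecodes_by_patterns_py; infer_instance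

-- ===== CLAIM (what is proved, stated in full; the proofs are below) =====
def Claim_equal_filter_timecodes_by_patterns_py : Prop := ∀ (items : List (List (String × String))) (patterns : List String), Dom_filter_timecodes_by_patterns_py items patterns → Spec_filter_timecodes_by_patterns_py items patterns (filter_timecodes_by_patterns_py items patterns)

-- ===== LEMMAS AND PROOFS =====

-- A's append-accumulator loop is a filter by "no pattern occurs".
theorem pvA_foldl (lp : List (List Char)) (items : List (List (String × String)))
    (acc : List (List (String × String))) :
    items.foldl (fun filtered item =>
      if lp.any (fun p => PySem.Chars.isIn p (pvCombined item)) then filtered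
      else filtered ++ [item]) acc
    = acc ++ items.filter (fun item => !lp.any (fun p => PySem.Chars.isIn p (pvCombined item))) := by
  induction items generalizing acc with
  | nil => simp
  | cons it rest ih =>
    simp only [List.foldl_cons, List.filter_cons]
    cases h : lp.any (fun p => PySem.Chars.isIn p (pvCombined it)) with
    | true => rw [if_pos rfl, ih, if_neg (by simp)]
    | false =>
      rw [if_neg (by simp), ih, if_pos (by simp), List.append_assoc]
      rfl

-- B's pattern-major foldl of filters is one filter by "every pattern absent".
theorem pvB_foldl (ps : List String) (sv : List (List Char × List (String × String))) :
    ps.foldl (fun sv p => sv.filter (fun cv => !PySem.Chars.isIn (PySem.Chars.lower p.toList) cv.1)) sv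
    = sv.filter (fun cv => ps.all (fun p => !PySem.Chars.isIn (PySem.Chars.lower p.toList) cv.1)) := by
  induction ps generalizing sv with
  | nil => simp
  | cons p rest ih =>
    simp only [List.foldl_cons, ih, List.filter_filter, List.all_cons]
    exact List.filter_congr (fun cv _ => by rw [Bool.and_comm])

-- ===== VERDICT (by name: the statement is the Claim_ definition above) =====
theorem filter_timecodes_by_patterns_py_spec : Claim_equal_filter_timecodes_by_patterns_py := by
  intro items patterns _
  unfold Spec_filter_timecodes_by_patterns_py
  simp only [filter_timecodes_by_patterns_py, filter_timecodes_by_patterns_py_alt]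
  rw [pvB_foldl, List.filter_map]
  by_cases hi : items = []
  · simp [hi]
  · simp only [if_neg hi, pvA_foldl, List.nil_append]
    rw [List.map_map]
    have : ∀ it : List (String × String),
        ((fun cv : List Char × List (String × String) =>
            patterns.all (fun p => !PySem.Chars.isIn (PySem.Chars.lower p.toList) cv.1)) ∘
          fun it => (pvCombined it, it)) it
        = !((patterns.map (fun p => PySem.Chars.lower p.toList)).any
            (fun p => PySem.Chars.isIn p (pvCombined it))) := by
      intro it
      simp [Function.comp_def, List.any_map, List.all_eq_not_any_not]
    rw [List.filter_congr (fun it _ => this it)]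
    simp [Function.comp_def]
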